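-- pv_equiv track=rewrite | github.com/Software-Cat/NCSSChallenge2021 | week_three/calculator_printer/program.py | get_digit_list
-- ===== SOURCE A (Python) =====
-- def get_digit_list(digit, size):
--     digitGrid = []
--     for i in range(size * 2 + 3):
--         digitGrid.append([" " for j in range(size + 2)])
--
--     width = len(digitGrid)
--     length = len(digitGrid[0])
--
--     if DIGITS[digit][0]:
--         for i in range(1, length - 1):
--             digitGrid[0][i] = "-"
--     if DIGITS[digit][1]:
--         for i in range(1, size + 1):
--             digitGrid[i][-1] = "|"
--     if DIGITS[digit][2]:
--         for i in range(size + 2, width - 1):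
--             digitGrid[i][-1] = "|"
--     if DIGITS[digit][3]:
--         for i in range(1, length - 1):
--             digitGrid[-1][i] = "-"
--     if DIGITS[digit][4]:
--         for i in range(1, size + 1):
--             digitGrid[i][0] = "|"
--     if DIGITS[digit][5]:
--         for i in range(size + 2, width - 1):
--             digitGrid[i][0] = "|"
--     if DIGITS[digit][6]:
--         for i in range(1, length - 1):
--             digitGrid[size + 1][i] = "-"
--
--     return digitGrid
--
-- DIGITS = [
--     [True, True, True, True, True, True, False],
--     [False, True, True, False, False, False, False],
--     [True, True, False, True, False, True, True],
--     [True, True, True, True, False, False, True],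
--     [False, True, True, False, True, False, True],
--     [True, False, True, True, True, False, True],
--     [True, False, True, True, True, True, True],
--     [True, True, True, False, False, False, False],
--     [True, True, True, True, True, True, True],
--     [True, True, True, True, True, False, True],
-- ]
-- ===== SOURCE B (Python) =====
-- DIGITS = [
--     [True, True, True, True, True, True, False],
--     [False, True, True, False, False, False, False],
--     [True, True, False, True, False, True, True],
--     [True, True, True, True, False, False, True],
--     [False, True, True, False, True, False, True],
--     [True, False, True, True, True, False, True],
--     [True, False, True, True, True, True, True],
--     [True, True, True, False, False, False, False],
--     [True, True, True, True, True, True, True],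
--     [True, True, True, True, True, False, True],
-- ]
--
--
-- def get_digit_list(digit, size):
--     seg = DIGITS[digit]
--     width = size * 2 + 3
--     length = size + 2
--     grid = []
--     for i in range(width):
--         dash = (i == 0 and seg[0]) or (i == size + 1 and seg[6]) or (i == width - 1 and seg[3])
--         upper = 1 <= i <= size
--         lower = size + 2 <= i <= width - 2
--         left = (upper and seg[4]) or (lower and seg[5])
--         right = (upper and seg[1]) or (lower and seg[2])
--         grid.append(["-" if (1 <= j <= length - 2 and dash)
--                      else "|" if ((j == 0 and left) or (j == length - 1 and right))
--                      else " "
--                      for j in range(length)])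
--     return grid
-- ===== Notes on version B (the rewrite author's own statement) =====
-- stated objective: alternative
-- what changed: Replaces A's build-then-mutate scheme (allocate a blank grid, then seven segment-driven write loops) with a single position-driven construction: for each row the active segment flags are computed from its index, and each cell's character is produced directly from its (i, j) coordinates, so the grid is built in one pass with no mutation.
import Mathlib
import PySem

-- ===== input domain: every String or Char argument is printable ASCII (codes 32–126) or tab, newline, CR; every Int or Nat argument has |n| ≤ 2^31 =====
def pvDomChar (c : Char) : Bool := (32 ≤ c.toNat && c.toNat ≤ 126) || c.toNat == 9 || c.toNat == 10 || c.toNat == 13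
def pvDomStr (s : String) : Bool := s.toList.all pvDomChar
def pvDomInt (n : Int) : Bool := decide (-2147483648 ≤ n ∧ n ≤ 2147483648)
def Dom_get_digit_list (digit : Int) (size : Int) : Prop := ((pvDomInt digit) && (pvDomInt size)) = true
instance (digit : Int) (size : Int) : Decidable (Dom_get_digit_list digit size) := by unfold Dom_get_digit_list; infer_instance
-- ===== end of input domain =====

-- B replaces A's build-then-mutate scheme (blank grid + seven segment write loops) by computing
-- each cell's character directly from its coordinates; equivalence of the two is proved below.

-- ===== PORT A =====
def pvDIGITS : List (List Bool) :=
  [[true, true, true, true, true, true, false],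
   [false, true, true, false, false, false, false],
   [true, true, false, true, false, true, true],
   [true, true, true, true, false, false, true],
   [false, true, true, false, true, false, true],
   [true, false, true, true, true, false, true],
   [true, false, true, true, true, true, true],
   [true, true, true, false, false, false, false],
   [true, true, true, true, true, true, true],
   [true, true, true, true, true, false, true]]

-- 'digitGrid[i][j] = v' (i, j possibly -1, as in A's code); total via pySetD, exact on in-range indices
def pvSetCell (g : List (List String)) (i j : Int) (v : String) : List (List String) :=
  PySem.List.pySetD g i (PySem.List.pySetD (PySem.List.pyGetD g i []) j v)

-- 'for i in range(a, b): digitGrid[r][i] = v'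
def pvApplyRow (g : List (List String)) (r a b : Int) (v : String) : List (List String) :=
  (PySem.List.pyRange a b 1).foldl (fun g i => pvSetCell g r i v) g

-- 'for i in range(a, b): digitGrid[i][c] = v'
def pvApplyCol (g : List (List String)) (a b c : Int) (v : String) : List (List String) :=
  (PySem.List.pyRange a b 1).foldl (fun g i => pvSetCell g i c v) g

def get_digit_list (digit : Int) (size : Int) : List (List String) :=
  let digitGrid : List (List String) :=
    (PySem.List.pyRange 0 (size * 2 + 3) 1).foldl
      (fun g _ => g ++ [(PySem.List.pyRange 0 (size + 2) 1).map (fun _ => " ")]) []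
  let width : Int := (digitGrid.length : Int)
  let length : Int := ((PySem.List.pyGetD digitGrid 0 []).length : Int)
  let g1 := if PySem.List.pyGetD (PySem.List.pyGetD pvDIGITS digit []) 0 false = true then
      pvApplyRow digitGrid 0 1 (length - 1) "-" else digitGrid
  let g2 := if PySem.List.pyGetD (PySem.List.pyGetD pvDIGITS digit []) 1 false = true then
      pvApplyCol g1 1 (size + 1) (-1) "|" else g1
  let g3 := if PySem.List.pyGetD (PySem.List.pyGetD pvDIGITS digit []) 2 false = true then
      pvApplyCol g2 (size + 2) (width - 1) (-1) "|" else g2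
  let g4 := if PySem.List.pyGetD (PySem.List.pyGetD pvDIGITS digit []) 3 false = true then
      pvApplyRow g3 (-1) 1 (length - 1) "-" else g3
  let g5 := if PySem.List.pyGetD (PySem.List.pyGetD pvDIGITS digit []) 4 false = true then
      pvApplyCol g4 1 (size + 1) 0 "|" else g4
  let g6 := if PySem.List.pyGetD (PySem.List.pyGetD pvDIGITS digit []) 5 false = true then
      pvApplyCol g5 (size + 2) (width - 1) 0 "|" else g5
  let g7 := if PySem.List.pyGetD (PySem.List.pyGetD pvDIGITS digit []) 6 false = true then
      pvApplyRow g6 (size + 1) 1 (length - 1) "-" else g6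
  g7

-- ===== PORT B =====
-- the body of Source B's loop: row i of the grid, each cell decided by geometry
def pvAltRow (seg : List Bool) (size width length i : Int) : List String :=
  let dash := (decide (i = 0) && PySem.List.pyGetD seg 0 false) ||
              (decide (i = size + 1) && PySem.List.pyGetD seg 6 false) ||
              (decide (i = width - 1) && PySem.List.pyGetD seg 3 false)
  let upper := decide (1 ≤ i) && decide (i ≤ size)
  let lower := decide (size + 2 ≤ i) && decide (i ≤ width - 2)
  let left := (upper && PySem.List.pyGetD seg 4 false) || (lower && PySem.List.pyGetD seg 5 false)
  let right := (upper && PySem.List.pyGetD seg 1 false) || (lower && PySem.List.pyGetD seg 2 false)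
  (PySem.List.pyRange 0 length 1).map (fun j =>
    if (decide (1 ≤ j) && decide (j ≤ length - 2)) && dash then "-"
    else if (decide (j = 0) && left) || (decide (j = length - 1) && right) then "|"
    else " ")

def get_digit_list_alt (digit : Int) (size : Int) : List (List String) :=
  let seg := PySem.List.pyGetD pvDIGITS digit []
  let width : Int := size * 2 + 3
  let length : Int := size + 2
  (PySem.List.pyRange 0 width 1).foldl
    (fun grid i => grid ++ [pvAltRow seg size width length i]) []

-- ===== PRECONDITION & SPEC =====
-- Pre_ excludes exactly the inputs where the Python A raises IndexError:
-- DIGITS[digit] needs -10 <= digit < 10, and digitGrid[0] needs size >= -1.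
def Pre_get_digit_list (digit : Int) (size : Int) : Prop :=
  -10 ≤ digit ∧ digit < 10 ∧ -1 ≤ size
instance (digit : Int) (size : Int) : Decidable (Pre_get_digit_list digit size) := by
  unfold Pre_get_digit_list; infer_instance

def pvWitness_get_digit_list : Int × Int := (8, 2)

def Spec_get_digit_list (digit : Int) (size : Int) (out : List (List String)) : Prop :=
  out = get_digit_list_alt digit size
instance (digit : Int) (size : Int) (out : List (List String)) :
    Decidable (Spec_get_digit_list digit size out) := by
  unfold Spec_get_digit_list; infer_instance

-- ===== CLAIM (what is proved, stated in full; the proofs are below) =====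
def Claim_equal_get_digit_list : Prop :=
  ∀ (digit : Int) (size : Int), Dom_get_digit_list digit size →
    Pre_get_digit_list digit size →
    Spec_get_digit_list digit size (get_digit_list digit size)

-- ===== LEMMAS AND PROOFS =====

-- bool-parameterised version of B's cell expression (definitionally pvAltRow's cell after the lookups)
def pvCellB (b0 b1 b2 b3 b4 b5 b6 : Bool) (size width length i j : Int) : String :=
  if (decide (1 ≤ j) && decide (j ≤ length - 2)) &&
      ((decide (i = 0) && b0) || (decide (i = size + 1) && b6) || (decide (i = width - 1) && b3)) then "-"
  else if (decide (j = 0) &&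
        (((decide (1 ≤ i) && decide (i ≤ size)) && b4) ||
         ((decide (size + 2 ≤ i) && decide (i ≤ width - 2)) && b5))) ||
       (decide (j = length - 1) &&
        (((decide (1 ≤ i) && decide (i ≤ size)) && b1) ||
         ((decide (size + 2 ≤ i) && decide (i ≤ width - 2)) && b2))) then "|"
  else " "

lemma pvRow_eq (seg : List Bool) (size width length i : Int) :
    pvAltRow seg size width length i =
      (PySem.List.pyRange 0 length 1).map (fun j =>
        pvCellB (PySem.List.pyGetD seg 0 false) (PySem.List.pyGetD seg 1 false)
          (PySem.List.pyGetD seg 2 false) (PySem.List.pyGetD seg 3 false)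
          (PySem.List.pyGetD seg 4 false) (PySem.List.pyGetD seg 5 false)
          (PySem.List.pyGetD seg 6 false) size width length i j) := rfl

def pvAt (g : List (List String)) (k l : Nat) : String := (g.getD k []).getD l " "

def pvGood (g : List (List String)) (W L : Nat) : Prop :=
  g.length = W ∧ ∀ row ∈ g, row.length = L

lemma pvExt (g h : List (List String)) (W L : Nat) (hg : pvGood g W L) (hh : pvGood h W L)
    (hat : ∀ k l : Nat, k < W → l < L → pvAt g k l = pvAt h k l) : g = h := by
  obtain ⟨hgl, hgr⟩ := hg
  obtain ⟨hhl, hhr⟩ := hh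
  apply List.ext_getElem (by rw [hgl, hhl])
  intro k hk1 hk2
  apply List.ext_getElem (by rw [hgr _ (List.getElem_mem hk1), hhr _ (List.getElem_mem hk2)])
  intro l hl1 hl2
  have hgk : g[k].length = L := hgr _ (List.getElem_mem hk1)
  have hthis := hat k l (by omega) (by omega)
  have e1 : pvAt g k l = g[k][l] := by
    unfold pvAt
    rw [List.getD_eq_getElem _ _ hk1]
    exact List.getD_eq_getElem _ _ hl1
  have e2 : pvAt h k l = h[k][l] := by
    unfold pvAt
    rw [List.getD_eq_getElem _ _ hk2]
    exact List.getD_eq_getElem _ _ hl2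
  rw [e1, e2] at hthis
  exact hthis

lemma pvSetD_neg_one {α : Type} (xs : List α) (v : α) (m : Nat) (h : xs.length = m + 1) :
    PySem.List.pySetD xs (-1) v = xs.set m v := by
  unfold PySem.List.pySetD PySem.List.pySet? PySem.List.pyIdx?
  rw [h, if_neg (by omega), if_pos (by omega)]
  norm_num

lemma pvGetD_neg_one_getD {α : Type} (xs : List α) (d : α) (m : Nat) (h : xs.length = m + 1) :
    PySem.List.pyGetD xs (-1) d = xs.getD m d := by
  unfold PySem.List.pyGetD PySem.List.pyGet? PySem.List.pyIdx?
  rw [h, if_neg (by omega), if_pos (by omega)]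
  rw [List.getD_eq_getElem?_getD]
  norm_num

lemma pvApplyCol_at (W L cm : Nat) (c : Int) (v : String) (hcm : cm < L)
    (hc : ∀ row : List String, row.length = L → PySem.List.pySetD row c v = row.set cm v) :
    ∀ (d : Nat) (a b : Int) (g : List (List String)), (b - a).toNat = d → 0 ≤ a → b ≤ (W : Int) →
      pvGood g W L →
      pvGood (pvApplyCol g a b c v) W L ∧
      ∀ k l : Nat, k < W → l < L →
        pvAt (pvApplyCol g a b c v) k l
          = if a ≤ (k : Int) ∧ (k : Int) < b ∧ (l : Int) = (cm : Int) then v else pvAt g k l := by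
  intro d
  induction d with
  | zero =>
    intro a b g hd ha hb hg
    unfold pvApplyCol
    rw [PySem.List.pyRange_one_eq_nil (by omega)]
    refine ⟨hg, ?_⟩
    intro k l hk hl
    rw [if_neg (by omega)]
    rfl
  | succ d ih =>
    intro a b g hd ha hb hg
    obtain ⟨hlen, hrows⟩ := hg
    have hab : a < b := by omega
    have haW : a.toNat < g.length := by omega
    have hrlen : g[a.toNat].length = L := hrows _ (List.getElem_mem haW)
    have hstep : pvSetCell g a c v = g.set a.toNat (g[a.toNat].set cm v) := by
      unfold pvSetCell
      rw [PySem.List.pyGetD_eq_getElem _ _ ha (by omega)]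
      rw [hc _ hrlen]
      rw [PySem.List.pySetD_of_nonneg _ _ ha]
    have hgood' : pvGood (pvSetCell g a c v) W L := by
      rw [hstep]
      refine ⟨by simpa using hlen, ?_⟩
      intro row hmem
      rcases List.mem_or_eq_of_mem_set hmem with hmo | hmo
      · exact hrows _ hmo
      · subst hmo; simpa using hrlen
    have hfold : pvApplyCol g a b c v = pvApplyCol (pvSetCell g a c v) (a + 1) b c v := by
      unfold pvApplyCol
      rw [PySem.List.pyRange_one_cons hab, List.foldl_cons]
    obtain ⟨ihgood, ihat⟩ := ih (a + 1) b (pvSetCell g a c v) (by omega) (by omega) hb hgood'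
    rw [hfold]
    refine ⟨ihgood, ?_⟩
    intro k l hk hl
    rw [ihat k l hk hl]
    have hat' : pvAt (pvSetCell g a c v) k l
        = if k = a.toNat ∧ l = cm then v else pvAt g k l := by
      rw [hstep]
      unfold pvAt
      simp only [List.getD_eq_getElem?_getD]
      have hrowq : (g.set a.toNat (g[a.toNat].set cm v))[k]?.getD []
          = if k = a.toNat then g[a.toNat].set cm v else g[k]?.getD [] := by
        by_cases hka : k = a.toNat
        · subst hka; rw [List.getElem?_set_self haW, if_pos rfl]; rfl
        · rw [List.getElem?_set_ne (fun hq => hka hq.symm), if_neg hka]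
      rw [hrowq]
      by_cases hka : k = a.toNat
      · rw [if_pos hka]
        subst hka
        have hcell : (g[a.toNat].set cm v)[l]?.getD " "
            = if l = cm then v else (g[a.toNat])[l]?.getD " " := by
          by_cases hlc : l = cm
          · subst hlc; rw [List.getElem?_set_self (by rw [hrlen]; omega), if_pos rfl]; rfl
          · rw [List.getElem?_set_ne (fun hq => hlc hq.symm), if_neg hlc]
        rw [hcell]
        rw [List.getElem?_eq_getElem haW]
        simp only [Option.getD_some, true_and]
      · rw [if_neg hka, if_neg (by tauto)]
    rw [hat']
    split_ifs <;> first | rfl | omega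

lemma pvApplyRow_at (W L rm : Nat) (r : Int) (v : String) (hrm : rm < W)
    (hset : ∀ (g : List (List String)) (x : List String), g.length = W →
      PySem.List.pySetD g r x = g.set rm x)
    (hget : ∀ g : List (List String), g.length = W → PySem.List.pyGetD g r [] = g.getD rm []) :
    ∀ (d : Nat) (a b : Int) (g : List (List String)), (b - a).toNat = d → 0 ≤ a → b ≤ (L : Int) →
      pvGood g W L →
      pvGood (pvApplyRow g r a b v) W L ∧
      ∀ k l : Nat, k < W → l < L →
        pvAt (pvApplyRow g r a b v) k l
          = if (k : Int) = (rm : Int) ∧ a ≤ (l : Int) ∧ (l : Int) < b then v else pvAt g k l := by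
  intro d
  induction d with
  | zero =>
    intro a b g hd ha hb hg
    unfold pvApplyRow
    rw [PySem.List.pyRange_one_eq_nil (by omega)]
    refine ⟨hg, ?_⟩
    intro k l hk hl
    rw [if_neg (by omega)]
    rfl
  | succ d ih =>
    intro a b g hd ha hb hg
    obtain ⟨hlen, hrows⟩ := hg
    have hab : a < b := by omega
    have hrmg : rm < g.length := by omega
    have hrlen : (g.getD rm []).length = L := by
      rw [List.getD_eq_getElem _ _ hrmg]
      exact hrows _ (List.getElem_mem hrmg)
    have hstep : pvSetCell g r a v = g.set rm ((g.getD rm []).set a.toNat v) := by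
      unfold pvSetCell
      rw [hget g hlen]
      rw [PySem.List.pySetD_of_nonneg _ _ ha]
      rw [hset g _ hlen]
    have hgood' : pvGood (pvSetCell g r a v) W L := by
      rw [hstep]
      refine ⟨by simpa using hlen, ?_⟩
      intro row hmem
      rcases List.mem_or_eq_of_mem_set hmem with hmo | hmo
      · exact hrows _ hmo
      · subst hmo; simpa using hrlen
    have hfold : pvApplyRow g r a b v = pvApplyRow (pvSetCell g r a v) r (a + 1) b v := by
      unfold pvApplyRow
      rw [PySem.List.pyRange_one_cons hab, List.foldl_cons]
    obtain ⟨ihgood, ihat⟩ := ih (a + 1) b (pvSetCell g r a v) (by omega) (by omega) hb hgood'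
    rw [hfold]
    refine ⟨ihgood, ?_⟩
    intro k l hk hl
    rw [ihat k l hk hl]
    have hat' : pvAt (pvSetCell g r a v) k l
        = if k = rm ∧ l = a.toNat then v else pvAt g k l := by
      rw [hstep]
      unfold pvAt
      simp only [List.getD_eq_getElem?_getD]
      simp only [List.getD_eq_getElem?_getD] at hrlen
      have hrowq : (g.set rm ((g[rm]?.getD []).set a.toNat v))[k]?.getD []
          = if k = rm then (g[rm]?.getD []).set a.toNat v else g[k]?.getD [] := by
        by_cases hkr : k = rm
        · subst hkr; rw [List.getElem?_set_self hrmg, if_pos rfl]; rfl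
        · rw [List.getElem?_set_ne (fun hq => hkr hq.symm), if_neg hkr]
      rw [hrowq]
      by_cases hkr : k = rm
      · rw [if_pos hkr, hkr]
        have hcell : ((g[rm]?.getD []).set a.toNat v)[l]?.getD " "
            = if l = a.toNat then v else (g[rm]?.getD [])[l]?.getD " " := by
          by_cases hla : l = a.toNat
          · subst hla; rw [List.getElem?_set_self (by rw [hrlen]; omega), if_pos rfl]; rfl
          · rw [List.getElem?_set_ne (fun hq => hla hq.symm), if_neg hla]
        rw [hcell]
        split_ifs <;> first | rfl | omega
      · rw [if_neg hkr, if_neg (by tauto)]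
    rw [hat']
    split_ifs <;> first | rfl | omega

lemma pvStage (b : Bool) (g g' : List (List String)) (W L : Nat)
    (R : Nat → Nat → Prop) [inst : ∀ k l, Decidable (R k l)] (v : String)
    (hg : pvGood g W L)
    (h : pvGood g' W L ∧ ∀ k l : Nat, k < W → l < L →
      pvAt g' k l = if R k l then v else pvAt g k l) :
    pvGood (if b = true then g' else g) W L ∧
    ∀ k l : Nat, k < W → l < L →
      pvAt (if b = true then g' else g) k l
        = if b = true ∧ R k l then v else pvAt g k l := by
  cases b
  · refine ⟨by simpa using hg, ?_⟩
    intro k l hk hl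
    simp
  · refine ⟨by simpa using h.1, ?_⟩
    intro k l hk hl
    simpa using h.2 k l hk hl

lemma pvGdrop {P : Prop} [Decidable P] (b : Bool) (v x : String) (h : ¬P) :
    (if b = true ∧ P then v else x) = x := by
  rw [if_neg]; rintro ⟨-, hP⟩; exact h hP

lemma pvTri {E1 E2 E3 Q1 Q2 Q3 : Prop} [Decidable E1] [Decidable E2] [Decidable E3]
    [Decidable Q1] [Decidable Q2] [Decidable Q3]
    (h12 : ¬(E1 ∧ E2)) (h13 : ¬(E1 ∧ E3)) (h23 : ¬(E2 ∧ E3)) (v x : String) :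
    (if Q2 ∧ E2 then v else if Q3 ∧ E3 then v else if Q1 ∧ E1 then v else x)
      = if ((E1 ∧ Q1) ∨ (E2 ∧ Q2)) ∨ (E3 ∧ Q3) then v else x := by
  split_ifs <;> first | rfl | tauto

lemma pvDuo {A1 A2 A3 A4 Q1 Q2 : Prop} [Decidable A1] [Decidable A2] [Decidable A3]
    [Decidable A4] [Decidable Q1] [Decidable Q2]
    (h : ¬((A1 ∧ A2) ∧ (A3 ∧ A4))) (v x : String) :
    (if Q2 ∧ (A3 ∧ A4) then v else if Q1 ∧ (A1 ∧ A2) then v else x)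
      = if ((A1 ∧ A2) ∧ Q1) ∨ ((A3 ∧ A4) ∧ Q2) then v else x := by
  split_ifs <;> first | rfl | tauto

lemma pvRangeMapConst {α : Type} (b : α) (m : Int) (mn : Nat) (h : m.toNat = mn) :
    (PySem.List.pyRange 0 m 1).map (fun _ => b) = List.replicate mn b := by
  rw [List.map_const', PySem.List.length_pyRange_one]
  congr 1
  omega

lemma pvCells (b0 b1 b2 b3 b4 b5 b6 : Bool) (n k l : Nat) (hk : k < 2*n+3) (hl : l < n+2) :
  (if b6 = true ∧ ((k:Int) = (n:Int)+1 ∧ 1 ≤ (l:Int) ∧ (l:Int) < (n:Int)+1) then "-"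
   else if b5 = true ∧ ((n:Int)+2 ≤ (k:Int) ∧ (k:Int) < 2*(n:Int)+2 ∧ (l:Int) = 0) then "|"
   else if b4 = true ∧ (1 ≤ (k:Int) ∧ (k:Int) < (n:Int)+1 ∧ (l:Int) = 0) then "|"
   else if b3 = true ∧ ((k:Int) = 2*(n:Int)+2 ∧ 1 ≤ (l:Int) ∧ (l:Int) < (n:Int)+1) then "-"
   else if b2 = true ∧ ((n:Int)+2 ≤ (k:Int) ∧ (k:Int) < 2*(n:Int)+2 ∧ (l:Int) = (n:Int)+1) then "|"
   else if b1 = true ∧ (1 ≤ (k:Int) ∧ (k:Int) < (n:Int)+1 ∧ (l:Int) = (n:Int)+1) then "|"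
   else if b0 = true ∧ ((k:Int) = 0 ∧ 1 ≤ (l:Int) ∧ (l:Int) < (n:Int)+1) then "-"
   else " ")
  = pvCellB b0 b1 b2 b3 b4 b5 b6 (n:Int) ((n:Int)*2+3) ((n:Int)+2) (k:Int) (l:Int) := by
  unfold pvCellB
  simp only [Bool.or_eq_true, Bool.and_eq_true, decide_eq_true_eq]
  rw [show ((n:Int) + 2 - 2 : Int) = (n:Int) from by ring,
      show ((n:Int)*2 + 3 - 1 : Int) = 2*(n:Int) + 2 from by ring,
      show ((n:Int)*2 + 3 - 2 : Int) = 2*(n:Int) + 1 from by ring,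
      show ((n:Int) + 2 - 1 : Int) = (n:Int) + 1 from by ring]
  by_cases hj : 1 ≤ (l:Int) ∧ (l:Int) < (n:Int) + 1
  · rw [pvGdrop (P := ((n:Int)+2 ≤ (k:Int) ∧ (k:Int) < 2*(n:Int)+2 ∧ (l:Int) = 0)) b5 "|" _ (by omega),
        pvGdrop (P := (1 ≤ (k:Int) ∧ (k:Int) < (n:Int)+1 ∧ (l:Int) = 0)) b4 "|" _ (by omega),
        pvGdrop (P := ((n:Int)+2 ≤ (k:Int) ∧ (k:Int) < 2*(n:Int)+2 ∧ (l:Int) = (n:Int)+1)) b2 "|" _ (by omega),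
        pvGdrop (P := (1 ≤ (k:Int) ∧ (k:Int) < (n:Int)+1 ∧ (l:Int) = (n:Int)+1)) b1 "|" _ (by omega)]
    rw [if_neg (show ¬(((l:Int) = 0 ∧
          (((1 ≤ (k:Int) ∧ (k:Int) ≤ (n:Int)) ∧ b4 = true) ∨
           (((n:Int)+2 ≤ (k:Int) ∧ (k:Int) ≤ 2*(n:Int)+1) ∧ b5 = true))) ∨
          ((l:Int) = (n:Int)+1 ∧
          (((1 ≤ (k:Int) ∧ (k:Int) ≤ (n:Int)) ∧ b1 = true) ∨
           (((n:Int)+2 ≤ (k:Int) ∧ (k:Int) ≤ 2*(n:Int)+1) ∧ b2 = true)))) from by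
          rintro (⟨h3, -⟩ | ⟨h3, -⟩) <;> omega)]
    simp only [eq_true (show (1:Int) ≤ (l:Int) by omega), eq_true (show (l:Int) ≤ (n:Int) by omega),
      eq_true (show (l:Int) < (n:Int) + 1 by omega), true_and, and_true]
    exact pvTri (by omega) (by omega) (by omega) "-" " "
  · by_cases hjz : (l:Int) = 0
    · rw [pvGdrop (P := ((k:Int) = (n:Int)+1 ∧ 1 ≤ (l:Int) ∧ (l:Int) < (n:Int)+1)) b6 "-" _ (by omega),
          pvGdrop (P := ((k:Int) = 2*(n:Int)+2 ∧ 1 ≤ (l:Int) ∧ (l:Int) < (n:Int)+1)) b3 "-" _ (by omega),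
          pvGdrop (P := ((n:Int)+2 ≤ (k:Int) ∧ (k:Int) < 2*(n:Int)+2 ∧ (l:Int) = (n:Int)+1)) b2 "|" _ (by omega),
          pvGdrop (P := (1 ≤ (k:Int) ∧ (k:Int) < (n:Int)+1 ∧ (l:Int) = (n:Int)+1)) b1 "|" _ (by omega),
          pvGdrop (P := ((k:Int) = 0 ∧ 1 ≤ (l:Int) ∧ (l:Int) < (n:Int)+1)) b0 "-" _ (by omega)]
      rw [if_neg (show ¬((1 ≤ (l:Int) ∧ (l:Int) ≤ (n:Int)) ∧
            ((((k:Int) = 0 ∧ b0 = true) ∨ ((k:Int) = (n:Int)+1 ∧ b6 = true)) ∨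
             ((k:Int) = 2*(n:Int)+2 ∧ b3 = true))) from by rintro ⟨⟨h1, -⟩, -⟩; omega)]
      simp only [eq_true hjz, eq_false (show ¬((l:Int) = (n:Int)+1) by omega), true_and, false_and,
        or_false, and_true,
        show ((k:Int) ≤ (n:Int)) ↔ ((k:Int) < (n:Int)+1) from by omega,
        show ((k:Int) ≤ 2*(n:Int)+1) ↔ ((k:Int) < 2*(n:Int)+2) from by omega]
      exact pvDuo (by omega) "|" " "
    · have hjL : (l:Int) = (n:Int) + 1 := by omega
      rw [pvGdrop (P := ((k:Int) = (n:Int)+1 ∧ 1 ≤ (l:Int) ∧ (l:Int) < (n:Int)+1)) b6 "-" _ (by omega),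
          pvGdrop (P := ((n:Int)+2 ≤ (k:Int) ∧ (k:Int) < 2*(n:Int)+2 ∧ (l:Int) = 0)) b5 "|" _ (by omega),
          pvGdrop (P := (1 ≤ (k:Int) ∧ (k:Int) < (n:Int)+1 ∧ (l:Int) = 0)) b4 "|" _ (by omega),
          pvGdrop (P := ((k:Int) = 2*(n:Int)+2 ∧ 1 ≤ (l:Int) ∧ (l:Int) < (n:Int)+1)) b3 "-" _ (by omega),
          pvGdrop (P := ((k:Int) = 0 ∧ 1 ≤ (l:Int) ∧ (l:Int) < (n:Int)+1)) b0 "-" _ (by omega)]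
      rw [if_neg (show ¬((1 ≤ (l:Int) ∧ (l:Int) ≤ (n:Int)) ∧
            ((((k:Int) = 0 ∧ b0 = true) ∨ ((k:Int) = (n:Int)+1 ∧ b6 = true)) ∨
             ((k:Int) = 2*(n:Int)+2 ∧ b3 = true))) from by rintro ⟨⟨-, h2⟩, -⟩; omega)]
      simp only [eq_true hjL, eq_false (show ¬((l:Int) = 0) by omega), true_and, false_and,
        false_or, and_true,
        show ((k:Int) ≤ (n:Int)) ↔ ((k:Int) < (n:Int)+1) from by omega,
        show ((k:Int) ≤ 2*(n:Int)+1) ↔ ((k:Int) < 2*(n:Int)+2) from by omega]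
      exact pvDuo (by omega) "|" " "

-- ===== VERDICT (by name: the statement is the Claim_ definition above) =====
theorem get_digit_list_spec : Claim_equal_get_digit_list := by
  intro digit size hdom hpre
  obtain ⟨hd1, hd2, hs⟩ := hpre
  unfold Spec_get_digit_list
  show get_digit_list digit size = get_digit_list_alt digit size
  simp only [get_digit_list, get_digit_list_alt, pvRow_eq]
  generalize PySem.List.pyGetD pvDIGITS digit [] = seg
  generalize PySem.List.pyGetD seg 0 false = b0
  generalize PySem.List.pyGetD seg 1 false = b1
  generalize PySem.List.pyGetD seg 2 false = b2
  generalize PySem.List.pyGetD seg 3 false = b3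
  generalize PySem.List.pyGetD seg 4 false = b4
  generalize PySem.List.pyGetD seg 5 false = b5
  generalize PySem.List.pyGetD seg 6 false = b6
  rcases (show size = -1 ∨ ∃ n : ℕ, size = (n : Int) from by
      by_cases h : 0 ≤ size
      · exact Or.inr ⟨size.toNat, by omega⟩
      · exact Or.inl (by omega)) with hsz | ⟨n, hsz⟩
  · subst hsz
    norm_num [pvApplyRow, pvApplyCol, pvCellB,
      Bool.or_eq_true, Bool.and_eq_true, decide_eq_true_eq,
      show PySem.List.pyRange 0 1 1 = [0] from by decide,
      show PySem.List.pyRange 1 0 1 = [] from by decide,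
      PySem.List.pyGetD_zero_cons, ite_self, List.foldl_cons, List.foldl_nil,
      List.map_cons, List.map_nil, List.nil_append]
  · subst hsz
    have hinit : (PySem.List.pyRange 0 ((n:Int) * 2 + 3) 1).foldl
        (fun g _ => g ++ [(PySem.List.pyRange 0 ((n:Int) + 2) 1).map (fun _ => " ")])
        ([] : List (List String))
        = List.replicate (2*n+3) (List.replicate (n+2) " ") := by
      rw [PySem.List.foldl_append_singleton_eq_map, List.nil_append]
      simp only [pvRangeMapConst " " ((n:Int)+2) (n+2) (by omega)]
      exact pvRangeMapConst _ _ _ (by omega)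
    have hget0 : PySem.List.pyGetD (List.replicate (2*n+3) (List.replicate (n+2) " ")) 0 []
        = List.replicate (n+2) " " := by
      rw [show 2*n+3 = (2*n+2)+1 from by omega, List.replicate_succ, PySem.List.pyGetD_zero_cons]
    have hG0 : pvGood (List.replicate (2*n+3) (List.replicate (n+2) " ")) (2*n+3) (n+2) := by
      constructor
      · exact List.length_replicate
      · intro row h
        rw [List.mem_replicate] at h
        rw [h.2]
        exact List.length_replicate
    have hG0at : ∀ k l : Nat, k < 2*n+3 → l < n+2 →
        pvAt (List.replicate (2*n+3) (List.replicate (n+2) " ")) k l = " " := by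
      intro k l hk hl
      unfold pvAt
      have h1 : (List.replicate (2*n+3) (List.replicate (n+2) " ")).getD k []
          = List.replicate (n+2) " " := by
        rw [List.getD_eq_getElem _ _ (by rw [List.length_replicate]; omega)]
        exact List.getElem_replicate _
      rw [h1]
      rw [List.getD_eq_getElem _ _ (by rw [List.length_replicate]; omega)]
      exact List.getElem_replicate _
    have hset0 : ∀ (g : List (List String)) (x : List String), g.length = 2*n+3 →
        PySem.List.pySetD g (0:Int) x = g.set 0 x := by
      intro g x _
      rw [PySem.List.pySetD_of_nonneg _ _ (by norm_num)]
      norm_num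
    have hgetz : ∀ g : List (List String), g.length = 2*n+3 →
        PySem.List.pyGetD g (0:Int) [] = g.getD 0 [] := fun g _ => PySem.List.pyGetD_zero g []
    have hsetm1 : ∀ (g : List (List String)) (x : List String), g.length = 2*n+3 →
        PySem.List.pySetD g (-1) x = g.set (2*n+2) x := by
      intro g x hg
      exact pvSetD_neg_one g x (2*n+2) (by omega)
    have hgetm1 : ∀ g : List (List String), g.length = 2*n+3 →
        PySem.List.pyGetD g (-1) [] = g.getD (2*n+2) [] := by
      intro g hg
      exact pvGetD_neg_one_getD g [] (2*n+2) (by omega)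
    have hsetn1 : ∀ (g : List (List String)) (x : List String), g.length = 2*n+3 →
        PySem.List.pySetD g ((n:Int)+1) x = g.set (n+1) x := by
      intro g x _
      rw [PySem.List.pySetD_of_nonneg _ _ (by omega)]
      simp only [show ((n:Int)+1).toNat = n+1 from by omega]
    have hgetn1 : ∀ g : List (List String), g.length = 2*n+3 →
        PySem.List.pyGetD g ((n:Int)+1) [] = g.getD (n+1) [] := by
      intro g hg
      rw [PySem.List.pyGetD_eq_getElem _ _ (by omega) (by rw [hg]; push_cast; omega)]
      rw [List.getD_eq_getElem _ _ (by omega)]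
      simp only [show ((n:Int)+1).toNat = n+1 from by omega]
    have hcm1 : ∀ row : List String, row.length = n+2 →
        PySem.List.pySetD row (-1) "|" = row.set (n+1) "|" :=
      fun row h => pvSetD_neg_one row "|" (n+1) (by omega)
    have hc0 : ∀ row : List String, row.length = n+2 →
        PySem.List.pySetD row (0:Int) "|" = row.set 0 "|" := by
      intro row _
      rw [PySem.List.pySetD_of_nonneg _ _ (by norm_num)]
      norm_num
    rw [hinit, hget0]
    simp only [List.length_replicate]
    push_cast
    rw [show (2*(n:Int)+3) - 1 = 2*(n:Int)+2 from by ring,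
        show ((n:Int)+2) - 1 = (n:Int)+1 from by ring]
    obtain ⟨good1, at1⟩ := pvStage b0 _ _ (2*n+3) (n+2) _ "-" hG0
      (pvApplyRow_at (2*n+3) (n+2) 0 0 "-" (by omega) hset0 hgetz
        (((n:Int)+1) - 1).toNat 1 ((n:Int)+1) _ rfl (by omega) (by omega) hG0)
    obtain ⟨good2, at2⟩ := pvStage b1 _ _ (2*n+3) (n+2) _ "|" good1
      (pvApplyCol_at (2*n+3) (n+2) (n+1) (-1) "|" (by omega) hcm1
        (((n:Int)+1) - 1).toNat 1 ((n:Int)+1) _ rfl (by omega) (by omega) good1)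
    obtain ⟨good3, at3⟩ := pvStage b2 _ _ (2*n+3) (n+2) _ "|" good2
      (pvApplyCol_at (2*n+3) (n+2) (n+1) (-1) "|" (by omega) hcm1
        ((2*(n:Int)+2) - ((n:Int)+2)).toNat ((n:Int)+2) (2*(n:Int)+2) _ rfl (by omega) (by omega) good2)
    obtain ⟨good4, at4⟩ := pvStage b3 _ _ (2*n+3) (n+2) _ "-" good3
      (pvApplyRow_at (2*n+3) (n+2) (2*n+2) (-1) "-" (by omega) hsetm1 hgetm1
        (((n:Int)+1) - 1).toNat 1 ((n:Int)+1) _ rfl (by omega) (by omega) good3)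
    obtain ⟨good5, at5⟩ := pvStage b4 _ _ (2*n+3) (n+2) _ "|" good4
      (pvApplyCol_at (2*n+3) (n+2) 0 0 "|" (by omega) hc0
        (((n:Int)+1) - 1).toNat 1 ((n:Int)+1) _ rfl (by omega) (by omega) good4)
    obtain ⟨good6, at6⟩ := pvStage b5 _ _ (2*n+3) (n+2) _ "|" good5
      (pvApplyCol_at (2*n+3) (n+2) 0 0 "|" (by omega) hc0
        ((2*(n:Int)+2) - ((n:Int)+2)).toNat ((n:Int)+2) (2*(n:Int)+2) _ rfl (by omega) (by omega) good5)
    obtain ⟨good7, at7⟩ := pvStage b6 _ _ (2*n+3) (n+2) _ "-" good6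
      (pvApplyRow_at (2*n+3) (n+2) (n+1) ((n:Int)+1) "-" (by omega) hsetn1 hgetn1
        (((n:Int)+1) - 1).toNat 1 ((n:Int)+1) _ rfl (by omega) (by omega) good6)
    have hBmap : (PySem.List.pyRange 0 ((n:Int)*2+3) 1).foldl
        (fun grid i => grid ++ [(PySem.List.pyRange 0 ((n:Int)+2) 1).map fun j =>
          pvCellB b0 b1 b2 b3 b4 b5 b6 (n:Int) ((n:Int)*2+3) ((n:Int)+2) i j]) []
        = (PySem.List.pyRange 0 ((n:Int)*2+3) 1).map fun i =>
            (PySem.List.pyRange 0 ((n:Int)+2) 1).map fun j =>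
              pvCellB b0 b1 b2 b3 b4 b5 b6 (n:Int) ((n:Int)*2+3) ((n:Int)+2) i j := by
      rw [PySem.List.foldl_append_singleton_eq_map, List.nil_append]
    rw [hBmap]
    have goodB : pvGood ((PySem.List.pyRange 0 ((n:Int)*2+3) 1).map fun i =>
        (PySem.List.pyRange 0 ((n:Int)+2) 1).map fun j =>
          pvCellB b0 b1 b2 b3 b4 b5 b6 (n:Int) ((n:Int)*2+3) ((n:Int)+2) i j) (2*n+3) (n+2) := by
      constructor
      · rw [List.length_map, PySem.List.length_pyRange_one]
        omega
      · intro row h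
        rw [List.mem_map] at h
        obtain ⟨i, -, rfl⟩ := h
        rw [List.length_map, PySem.List.length_pyRange_one]
        omega
    have hBat : ∀ k l : Nat, k < 2*n+3 → l < n+2 →
        pvAt ((PySem.List.pyRange 0 ((n:Int)*2+3) 1).map fun i =>
          (PySem.List.pyRange 0 ((n:Int)+2) 1).map fun j =>
            pvCellB b0 b1 b2 b3 b4 b5 b6 (n:Int) ((n:Int)*2+3) ((n:Int)+2) i j) k l
          = pvCellB b0 b1 b2 b3 b4 b5 b6 (n:Int) ((n:Int)*2+3) ((n:Int)+2) (k:Int) (l:Int) := by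
      intro k l hk hl
      unfold pvAt
      have h1 : ((PySem.List.pyRange 0 ((n:Int)*2+3) 1).map fun i =>
            (PySem.List.pyRange 0 ((n:Int)+2) 1).map fun j =>
              pvCellB b0 b1 b2 b3 b4 b5 b6 (n:Int) ((n:Int)*2+3) ((n:Int)+2) i j).getD k []
          = (PySem.List.pyRange 0 ((n:Int)+2) 1).map fun j =>
              pvCellB b0 b1 b2 b3 b4 b5 b6 (n:Int) ((n:Int)*2+3) ((n:Int)+2) (k:Int) j := by
        rw [List.getD_eq_getElem _ _ (by rw [List.length_map, PySem.List.length_pyRange_one]; omega)]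
        rw [List.getElem_map, PySem.List.getElem_pyRange_one, zero_add]
      rw [h1]
      rw [List.getD_eq_getElem _ _ (by rw [List.length_map, PySem.List.length_pyRange_one]; omega)]
      rw [List.getElem_map, PySem.List.getElem_pyRange_one, zero_add]
    refine pvExt _ _ (2*n+3) (n+2) good7 goodB ?_
    intro k l hk hl
    rw [at7 k l hk hl, at6 k l hk hl, at5 k l hk hl, at4 k l hk hl, at3 k l hk hl,
        at2 k l hk hl, at1 k l hk hl, hG0at k l hk hl, hBat k l hk hl]
    push_cast
    exact pvCells b0 b1 b2 b3 b4 b5 b6 n k l hk hl
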